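-- pv_equiv track=rewrite | github.com/Junnjjj/Algorithm | Sample_Question/String/kakao04.py | findIllegal
-- ===== SOURCE A (Python) =====
-- from collections import deque
--
-- moves = [(1,0), (-1,0), (0,1), (0,-1)]
--
-- def findIllegal(p):
--     people = []
--     for i in range(5):
--         for j in range(5):
--             if p[i][j] == 'P': # 사람일 경우
--               people.append([i,j])
--
--     if len(people) == 0:
--       return 1
--
--
--     for person in people:
--
--       q = deque()
--       person += [0] # 거리
--       q.append(person)
--       visited = [[False] * 5 for _ in range(5)] # 사람 마다 시도
--
--       while q:
--           dr,dc,length = q.popleft()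
--           visited[dr][dc] = True
--
--           nr,nc = dr,dc
--
--           for move in moves:
--               nr = dr + move[0]
--               nc = dc + move[1]
--
--               # 범위 벗어나거나 파티션을 만날 때
--               if nr < 0 or nc < 0 or nr >= 5 or nc >= 5 or p[nr][nc] == 'X':
--                   continue
--
--               if not visited[nr][nc] and p[nr][nc] != 'P': # 방문하지 않았다면 방문처리
--                   visited[nr][nc] = True
--                   q.append([nr,nc,length+1])
--               elif p[nr][nc] == 'P' and not visited[nr][nc]: # 다른 사람 만나면
--                   if length+1 <= 2: # 맨하튼 거리가 2 이하면
--                     return 0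
--
--     return 1
-- ===== SOURCE B (Python) =====
-- def findIllegal(p):
--     # direct fixed-offset pattern test per person instead of a BFS with queue/visited
--     for i in range(5):
--         for j in range(5):
--             if p[i][j] != 'P':
--                 continue
--             for di, dj in ((1, 0), (-1, 0), (0, 1), (0, -1)):
--                 r, c = i + di, j + dj
--                 if 0 <= r < 5 and 0 <= c < 5 and p[r][c] == 'P':
--                     return 0
--             for di, dj, mi, mj in ((2, 0, 1, 0), (-2, 0, -1, 0), (0, 2, 0, 1), (0, -2, 0, -1)):
--                 r, c = i + di, j + dj
--                 if 0 <= r < 5 and 0 <= c < 5 and p[r][c] == 'P' and p[i + mi][j + mj] != 'X':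
--                     return 0
--             for di, dj in ((1, 1), (1, -1), (-1, 1), (-1, -1)):
--                 r, c = i + di, j + dj
--                 if 0 <= r < 5 and 0 <= c < 5 and p[r][c] == 'P' and (p[i][c] != 'X' or p[r][j] != 'X'):
--                     return 0
--     return 1
-- ===== Notes on version B (the rewrite author's own statement) =====
-- stated objective: simpler
-- what changed: Replaces the per-person BFS (deque + 5x5 visited matrix, exploring the whole reachable grid) by a direct test of the twelve fixed manhattan-distance-1/2 offset patterns around each person (orthogonal neighbour; straight two-step with non-partition middle; diagonal with a non-partition shared corner).
import Mathlib
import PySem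

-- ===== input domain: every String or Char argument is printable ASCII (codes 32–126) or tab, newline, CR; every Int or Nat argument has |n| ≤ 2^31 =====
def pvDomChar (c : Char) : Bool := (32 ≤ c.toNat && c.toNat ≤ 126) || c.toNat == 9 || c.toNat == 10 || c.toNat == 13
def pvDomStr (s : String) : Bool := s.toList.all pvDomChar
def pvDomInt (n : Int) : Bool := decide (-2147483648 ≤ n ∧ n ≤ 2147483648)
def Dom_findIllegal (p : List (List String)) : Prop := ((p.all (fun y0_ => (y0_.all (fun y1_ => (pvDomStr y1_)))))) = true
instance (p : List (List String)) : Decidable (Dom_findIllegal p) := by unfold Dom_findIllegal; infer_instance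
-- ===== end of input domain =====

-- B replaces A's per-person BFS (queue + visited matrix) by a direct test of the twelve
-- fixed manhattan-distance-≤2 offset patterns; equivalence of the RETURN VALUE is proved
-- (A also mutates the inner lists of its local `people`, which is not observable outside).

-- ===== PORT A =====
-- p[r][c], total via default "" (under Pre_ every access A makes is in range 0..4, so exact)
def pvCell (p : List (List String)) (r c : Int) : String :=
  ((PySem.List.pyGet? p r).bind (fun row => PySem.List.pyGet? row c)).getD ""

def pvMoves : List (Int × Int) := [(1, 0), (-1, 0), (0, 1), (0, -1)]

-- the body of A's `while q` / `for move in moves` loop: processes the moves of the cell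
-- (dr,dc,length) just popped; `none` = Python's `return 0` fired, `some (q', v')` = the
-- queue and visited set after this iteration (visited is kept as the list of True cells).
def pvStep (p : List (List String)) (dr dc len : Int) :
    List (Int × Int) → List (Int × Int × Int) → List (Int × Int) →
    Option (List (Int × Int × Int) × List (Int × Int))
  | [], q, v => some (q, v)
  | (mr, mc) :: ms, q, v =>
    if dr + mr < 0 ∨ dc + mc < 0 ∨ 5 ≤ dr + mr ∨ 5 ≤ dc + mc ∨ pvCell p (dr + mr) (dc + mc) = "X" then
      pvStep p dr dc len ms q v
    else if (dr + mr, dc + mc) ∉ v ∧ pvCell p (dr + mr) (dc + mc) ≠ "P" then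
      pvStep p dr dc len ms (q ++ [(dr + mr, dc + mc, len + 1)]) ((dr + mr, dc + mc) :: v)
    else if pvCell p (dr + mr) (dc + mc) = "P" ∧ (dr + mr, dc + mc) ∉ v then
      if len + 1 ≤ 2 then none else pvStep p dr dc len ms q v
    else
      pvStep p dr dc len ms q v

-- termination helpers for the while-loop: number of grid cells not yet visited
def pvCells : List (Int × Int) :=
  (List.range 5).flatMap (fun i => (List.range 5).map (fun j => ((i : Int), (j : Int))))

def pvCnt (v : List (Int × Int)) : Nat := (pvCells.filter (fun c => decide (c ∉ v))).length

lemma pv_filter_le {α : Type} (L : List α) (q1 q2 : α → Bool) (h : ∀ a, q1 a = true → q2 a = true) :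
    (L.filter q1).length ≤ (L.filter q2).length := by
  induction L with
  | nil => simp
  | cons a t ih =>
    by_cases h1 : q1 a = true
    · simp [List.filter_cons, h1, h a h1]; omega
    · have h1' : q1 a = false := by simpa using h1
      by_cases h2 : q2 a = true
      · simp [List.filter_cons, h1', h2]; omega
      · have h2' : q2 a = false := by simpa using h2
        simpa [List.filter_cons, h1', h2'] using ih

lemma pv_filter_lt {α : Type} (L : List α) (q1 q2 : α → Bool) (x : α)
    (h : ∀ a, q1 a = true → q2 a = true) (hx : x ∈ L) (hx2 : q2 x = true) (hx1 : q1 x = false) :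
    (L.filter q1).length < (L.filter q2).length := by
  induction L with
  | nil => simp at hx
  | cons a t ih =>
    rcases List.mem_cons.1 hx with rfl | hmem
    · simp only [List.filter_cons, hx1, hx2]
      simpa using Nat.lt_succ_of_le (pv_filter_le t q1 q2 h)
    · by_cases h1 : q1 a = true
      · simp [List.filter_cons, h1, h a h1]
        exact ih hmem
      · have h1' : q1 a = false := by simpa using h1
        by_cases h2 : q2 a = true
        · simp [List.filter_cons, h1', h2]
          exact le_of_lt (ih hmem)
        · have h2' : q2 a = false := by simpa using h2
          simpa [List.filter_cons, h1', h2'] using ih hmem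

lemma pvCnt_cons_le (x : Int × Int) (v : List (Int × Int)) : pvCnt (x :: v) ≤ pvCnt v := by
  apply pv_filter_le
  intro a ha
  simp only [decide_eq_true_eq] at *
  intro hav; exact ha (List.mem_cons_of_mem _ hav)

lemma pv_mem_pvCells (r c : Int) (h0 : 0 ≤ r) (h1 : r < 5) (h2 : 0 ≤ c) (h3 : c < 5) :
    (r, c) ∈ pvCells := by
  simp [pvCells, List.mem_flatMap, List.mem_map, List.mem_range, Prod.ext_iff]
  exact ⟨⟨r.toNat, by omega, by omega⟩, ⟨c.toNat, by omega, by omega⟩⟩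

lemma pvCnt_cons_lt (x : Int × Int) (v : List (Int × Int)) (hx : x ∈ pvCells) (hv : x ∉ v) :
    pvCnt (x :: v) < pvCnt v := by
  apply pv_filter_lt _ _ _ x
  · intro a ha
    simp only [decide_eq_true_eq] at *
    intro hav; exact ha (List.mem_cons_of_mem _ hav)
  · exact hx
  · simpa using hv
  · simp

lemma pvStep_measure (p : List (List String)) (dr dc len : Int) :
    ∀ (ms : List (Int × Int)) (q : List (Int × Int × Int)) (v : List (Int × Int))
      (q' : List (Int × Int × Int)) (v' : List (Int × Int)),
      pvStep p dr dc len ms q v = some (q', v') →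
      5 * pvCnt v' + q'.length ≤ 5 * pvCnt v + q.length := by
  intro ms
  induction ms with
  | nil => intro q v q' v' h; simp only [pvStep, Option.some.injEq, Prod.mk.injEq] at h
           rcases h with ⟨rfl, rfl⟩; omega
  | cons m ms ih =>
    intro q v q' v' h
    obtain ⟨mr, mc⟩ := m
    simp only [pvStep] at h
    split at h
    · exact ih q v q' v' h
    · split at h
      · rename_i hg hpush
        have hlt : pvCnt ((dr + mr, dc + mc) :: v) < pvCnt v := by
          apply pvCnt_cons_lt
          · push_neg at hg; exact pv_mem_pvCells _ _ (by omega) (by omega) (by omega) (by omega)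
          · exact hpush.1
        have := ih _ _ q' v' h
        simp at this ⊢
        omega
      · split at h
        · split at h
          · exact absurd h (by simp)
          · exact ih q v q' v' h
        · exact ih q v q' v' h

-- A's `while q:` loop; returns true iff Python's `return 0` fires for this person
def pvBfs (p : List (List String)) : List (Int × Int × Int) → List (Int × Int) → Bool
  | [], _ => false
  | (dr, dc, len) :: q, v =>
    match _h : pvStep p dr dc len pvMoves q (if (dr, dc) ∈ v then v else (dr, dc) :: v) with
    | none => true
    | some (q', v') => pvBfs p q' v'
termination_by q v => 5 * pvCnt v + q.length
decreasing_by
  have h1 := pvStep_measure p dr dc len pvMoves q _ q' v' _h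
  have h2 : pvCnt (if (dr, dc) ∈ v then v else (dr, dc) :: v) ≤ pvCnt v := by
    split
    · exact le_refl _
    · exact pvCnt_cons_le _ _
  simp at h1 ⊢
  omega

-- the people-collection double loop (append-accumulator, as in A)
def pvPeople (p : List (List String)) : List (Int × Int) :=
  (PySem.List.pyRange 0 5 1).foldl
    (fun acc i => (PySem.List.pyRange 0 5 1).foldl
      (fun acc2 j => if pvCell p i j = "P" then acc2 ++ [(i, j)] else acc2) acc) []

def findIllegal (p : List (List String)) : Int :=
  let people := pvPeople p
  if people.length = 0 then 1
  else if people.any (fun s => pvBfs p [(s.1, s.2, 0)] []) then 0 else 1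

-- ===== PORT B =====
def altCell (p : List (List String)) (r c : Int) : String :=
  ((PySem.List.pyGet? p r).bind (fun row => PySem.List.pyGet? row c)).getD ""

def altInR (r c : Int) : Bool := decide (0 ≤ r) && decide (r < 5) && decide (0 ≤ c) && decide (c < 5)

def altIllegalAt (p : List (List String)) (i j : Int) : Bool :=
  ([((1 : Int), (0 : Int)), (-1, 0), (0, 1), (0, -1)].any (fun d =>
      altInR (i + d.1) (j + d.2) && (altCell p (i + d.1) (j + d.2) == "P")))
  || ([((2 : Int), (0 : Int), (1 : Int), (0 : Int)), (-2, 0, -1, 0), (0, 2, 0, 1), (0, -2, 0, -1)].any (fun d =>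
      altInR (i + d.1) (j + d.2.1) && (altCell p (i + d.1) (j + d.2.1) == "P")
        && (altCell p (i + d.2.2.1) (j + d.2.2.2) != "X")))
  || ([((1 : Int), (1 : Int)), (1, -1), (-1, 1), (-1, -1)].any (fun d =>
      altInR (i + d.1) (j + d.2) && (altCell p (i + d.1) (j + d.2) == "P")
        && ((altCell p i (j + d.2) != "X") || (altCell p (i + d.1) j != "X"))))

def findIllegal_alt (p : List (List String)) : Int :=
  if (PySem.List.pyRange 0 5 1).any (fun i => (PySem.List.pyRange 0 5 1).any (fun j =>
      (altCell p i j == "P") && altIllegalAt p i j)) then 0 else 1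

-- ===== PRECONDITION & SPEC =====
-- Pre_ excludes exactly the inputs where A raises IndexError: A unconditionally indexes
-- p[i][j] for all 0 ≤ i,j < 5, so it needs at least 5 rows whose first 5 each have ≥ 5 entries.
def Pre_findIllegal (p : List (List String)) : Prop :=
  5 ≤ p.length ∧ ∀ row ∈ p.take 5, 5 ≤ row.length
instance (p : List (List String)) : Decidable (Pre_findIllegal p) := by unfold Pre_findIllegal; infer_instance

def pvWitness_findIllegal : List (List String) :=
  [["O","O","O","O","O"],["O","O","O","O","O"],["O","O","O","O","O"],["O","O","O","O","O"],["O","O","O","O","O"]]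

def Spec_findIllegal (p : List (List String)) (out : Int) : Prop := out = findIllegal_alt p
instance (p : List (List String)) (out : Int) : Decidable (Spec_findIllegal p out) := by unfold Spec_findIllegal; infer_instance

-- ===== CLAIM (what is proved, stated in full; the proofs are below) =====
def Claim_equal_findIllegal : Prop := ∀ (p : List (List String)), Dom_findIllegal p → Pre_findIllegal p → Spec_findIllegal p (findIllegal p)

-- ===== LEMMAS AND PROOFS =====

def InRp (r c : Int) : Prop := 0 ≤ r ∧ r < 5 ∧ 0 ≤ c ∧ c < 5

lemma altCell_eq (p : List (List String)) (r c : Int) : altCell p r c = pvCell p r c := rfl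

lemma pvMoves_pairwise (a b : Int) :
    List.Pairwise (fun m m' => (a + m.1, b + m.2) ≠ (a + m'.1, b + m'.2)) pvMoves := by
  refine List.Pairwise.cons ?_ (List.Pairwise.cons ?_ (List.Pairwise.cons ?_ (List.pairwise_singleton _ _))) <;>
  · intro m hm
    fin_cases hm <;> intro h <;> rw [Prod.mk.injEq] at h <;> omega

lemma pv_move_ne (a b : Int) (m : Int × Int) (hm : m ∈ pvMoves) : (a + m.1, b + m.2) ≠ (a, b) := by
  fin_cases hm <;> intro h <;> rw [Prod.mk.injEq] at h <;> omega

lemma pvStep_none_iff (p : List (List String)) (dr dc len : Int) :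
    ∀ (ms : List (Int × Int)) (q : List (Int × Int × Int)) (v : List (Int × Int)),
    pvStep p dr dc len ms q v = none ↔
      (len + 1 ≤ 2 ∧ ∃ m ∈ ms, InRp (dr + m.1) (dc + m.2) ∧
        pvCell p (dr + m.1) (dc + m.2) = "P" ∧ (dr + m.1, dc + m.2) ∉ v) := by
  intro ms
  induction ms with
  | nil => intro q v; simp [pvStep]
  | cons m ms ih =>
    intro q v
    obtain ⟨mr, mc⟩ := m
    simp only [pvStep]
    split_ifs with hg hpush hP hle
    · rw [ih]
      constructor
      · rintro ⟨hl, m', hm', hc⟩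
        exact ⟨hl, m', List.mem_cons_of_mem _ hm', hc⟩
      · rintro ⟨hl, m', hm', hIn, hcell, hnv⟩
        rcases List.mem_cons.1 hm' with rfl | h'
        · exfalso
          obtain ⟨a1, a2, a3, a4⟩ := hIn
          rcases hg with h | h | h | h | h
          · omega
          · omega
          · omega
          · omega
          · exact absurd (hcell ▸ h) (by decide)
        · exact ⟨hl, m', h', hIn, hcell, hnv⟩
    · rw [ih]
      constructor
      · rintro ⟨hl, m', hm', hIn, hcell, hnv⟩
        exact ⟨hl, m', List.mem_cons_of_mem _ hm', hIn, hcell,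
          fun hv => hnv (List.mem_cons_of_mem _ hv)⟩
      · rintro ⟨hl, m', hm', hIn, hcell, hnv⟩
        rcases List.mem_cons.1 hm' with rfl | h'
        · exact absurd hcell hpush.2
        · refine ⟨hl, m', h', hIn, hcell, ?_⟩
          intro hv
          rcases List.mem_cons.1 hv with heq | hv'
          · rw [Prod.mk.injEq] at heq
            obtain ⟨h1, h2⟩ := heq
            rw [h1, h2] at hcell
            exact hpush.2 hcell
          · exact hnv hv'
    · push_neg at hg
      obtain ⟨g1, g2, g3, g4, g5⟩ := hg
      constructor
      · intro _
        exact ⟨hle, (mr, mc), List.mem_cons_self,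
          ⟨by omega, by omega, by omega, by omega⟩, hP.1, hP.2⟩
      · intro _; rfl
    · rw [ih]
      constructor
      · rintro ⟨hl, _⟩; exact absurd hl hle
      · rintro ⟨hl, _⟩; exact absurd hl hle
    · rw [ih]
      constructor
      · rintro ⟨hl, m', hm', hc⟩
        exact ⟨hl, m', List.mem_cons_of_mem _ hm', hc⟩
      · rintro ⟨hl, m', hm', hIn, hcell, hnv⟩
        rcases List.mem_cons.1 hm' with rfl | h'
        · exact absurd ⟨hcell, hnv⟩ hP
        · exact ⟨hl, m', h', hIn, hcell, hnv⟩

lemma pvStep_some_subset (p : List (List String)) (dr dc len : Int) :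
    ∀ (ms : List (Int × Int)) (q : List (Int × Int × Int)) (v : List (Int × Int))
      (q' : List (Int × Int × Int)) (v' : List (Int × Int)),
    pvStep p dr dc len ms q v = some (q', v') → ∀ x ∈ v, x ∈ v' := by
  intro ms
  induction ms with
  | nil =>
    intro q v q' v' h x hx
    simp only [pvStep, Option.some.injEq, Prod.mk.injEq] at h
    rw [← h.2]
    exact hx
  | cons m ms ih =>
    intro q v q' v' h x hx
    obtain ⟨mr, mc⟩ := m
    simp only [pvStep] at h
    split_ifs at h with hg hpush hP hle
    · exact ih _ _ _ _ h x hx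
    · exact ih _ _ _ _ h x (List.mem_cons_of_mem _ hx)
    · exact ih _ _ _ _ h x hx
    · exact ih _ _ _ _ h x hx

lemma pvStep_some_visited (p : List (List String)) (dr dc len : Int) :
    ∀ (ms : List (Int × Int)) (q : List (Int × Int × Int)) (v : List (Int × Int))
      (q' : List (Int × Int × Int)) (v' : List (Int × Int)),
    pvStep p dr dc len ms q v = some (q', v') →
    ∀ x ∈ v', x ∈ v ∨ (InRp x.1 x.2 ∧ pvCell p x.1 x.2 ≠ "P") := by
  intro ms
  induction ms with
  | nil =>
    intro q v q' v' h x hx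
    simp only [pvStep, Option.some.injEq, Prod.mk.injEq] at h
    rw [← h.2] at hx
    exact Or.inl hx
  | cons m ms ih =>
    intro q v q' v' h x hx
    obtain ⟨mr, mc⟩ := m
    simp only [pvStep] at h
    split_ifs at h with hg hpush hP hle
    · exact ih _ _ _ _ h x hx
    · rcases ih _ _ _ _ h x hx with hv | hgood
      · rcases List.mem_cons.1 hv with rfl | hv'
        · push_neg at hg
          exact Or.inr ⟨⟨by omega, by omega, by omega, by omega⟩, hpush.2⟩
        · exact Or.inl hv'
      · exact Or.inr hgood
    · exact ih _ _ _ _ h x hx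
    · exact ih _ _ _ _ h x hx

lemma pvStep_some_mem (p : List (List String)) (dr dc len : Int) :
    ∀ (ms : List (Int × Int)) (q : List (Int × Int × Int)) (v : List (Int × Int))
      (q' : List (Int × Int × Int)) (v' : List (Int × Int)),
    List.Pairwise (fun m m' => (dr + m.1, dc + m.2) ≠ (dr + m'.1, dc + m'.2)) ms →
    pvStep p dr dc len ms q v = some (q', v') →
    ∀ e, e ∈ q' ↔ e ∈ q ∨ ∃ m ∈ ms,
      (InRp (dr + m.1) (dc + m.2) ∧ pvCell p (dr + m.1) (dc + m.2) ≠ "X" ∧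
       pvCell p (dr + m.1) (dc + m.2) ≠ "P" ∧ (dr + m.1, dc + m.2) ∉ v) ∧
      e = (dr + m.1, dc + m.2, len + 1) := by
  intro ms
  induction ms with
  | nil =>
    intro q v q' v' _ h e
    simp only [pvStep, Option.some.injEq, Prod.mk.injEq] at h
    simp [← h.1]
  | cons m ms ih =>
    intro q v q' v' hpw h e
    obtain ⟨mr, mc⟩ := m
    have hpwt := (List.pairwise_cons.1 hpw).2
    have hpwh := (List.pairwise_cons.1 hpw).1
    simp only [pvStep] at h
    split_ifs at h with hg hpush hP hle
    · rw [ih _ _ _ _ hpwt h e]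
      constructor
      · rintro (hq | ⟨m', hm', hc, he⟩)
        · exact Or.inl hq
        · exact Or.inr ⟨m', List.mem_cons_of_mem _ hm', hc, he⟩
      · rintro (hq | ⟨m', hm', ⟨hIn, hX, hPc, hnv⟩, he⟩)
        · exact Or.inl hq
        · rcases List.mem_cons.1 hm' with rfl | h'
          · exfalso
            obtain ⟨a1, a2, a3, a4⟩ := hIn
            rcases hg with hh | hh | hh | hh | hh
            · omega
            · omega
            · omega
            · omega
            · exact hX hh
          · exact Or.inr ⟨m', h', ⟨hIn, hX, hPc, hnv⟩, he⟩
    · -- push branch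
      push_neg at hg
      obtain ⟨g1, g2, g3, g4, g5⟩ := hg
      rw [ih _ _ _ _ hpwt h e]
      constructor
      · rintro (hq | ⟨m', hm', ⟨hIn, hX, hPc, hnv⟩, he⟩)
        · rcases List.mem_append.1 hq with hq' | hq1
          · exact Or.inl hq'
          · rcases List.mem_singleton.1 hq1 with rfl
            exact Or.inr ⟨(mr, mc), List.mem_cons_self,
              ⟨⟨by omega, by omega, by omega, by omega⟩, g5, hpush.2, hpush.1⟩, rfl⟩
        · refine Or.inr ⟨m', List.mem_cons_of_mem _ hm', ⟨hIn, hX, hPc, ?_⟩, he⟩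
          intro hv; exact hnv (List.mem_cons_of_mem _ hv)
      · rintro (hq | ⟨m', hm', ⟨hIn, hX, hPc, hnv⟩, he⟩)
        · exact Or.inl (List.mem_append.2 (Or.inl hq))
        · rcases List.mem_cons.1 hm' with rfl | h'
          · subst he
            exact Or.inl (List.mem_append.2 (Or.inr (List.mem_singleton.2 rfl)))
          · refine Or.inr ⟨m', h', ⟨hIn, hX, hPc, ?_⟩, he⟩
            intro hv
            rcases List.mem_cons.1 hv with heq | hv'
            · exact (hpwh m' h') heq.symm
            · exact hnv hv'
    · rw [ih _ _ _ _ hpwt h e]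
      constructor
      · rintro (hq | ⟨m', hm', hc, he⟩)
        · exact Or.inl hq
        · exact Or.inr ⟨m', List.mem_cons_of_mem _ hm', hc, he⟩
      · rintro (hq | ⟨m', hm', ⟨hIn, hX, hPc, hnv⟩, he⟩)
        · exact Or.inl hq
        · rcases List.mem_cons.1 hm' with rfl | h'
          · exact absurd hP.1 hPc
          · exact Or.inr ⟨m', h', ⟨hIn, hX, hPc, hnv⟩, he⟩
    · rw [ih _ _ _ _ hpwt h e]
      constructor
      · rintro (hq | ⟨m', hm', hc, he⟩)
        · exact Or.inl hq
        · exact Or.inr ⟨m', List.mem_cons_of_mem _ hm', hc, he⟩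
      · rintro (hq | ⟨m', hm', ⟨hIn, hX, hPc, hnv⟩, he⟩)
        · exact Or.inl hq
        · rcases List.mem_cons.1 hm' with rfl | h'
          · exact absurd ⟨hnv, hPc⟩ hpush
          · exact Or.inr ⟨m', h', ⟨hIn, hX, hPc, hnv⟩, he⟩

-- the trigger condition for a queue entry (a length-1 node with a P neighbour other than the start)
def pvTrigE (p : List (List String)) (i j : Int) (e : Int × Int × Int) : Prop :=
  e.2.2 = 1 ∧ ∃ m ∈ pvMoves, InRp (e.1 + m.1) (e.2.1 + m.2) ∧
    pvCell p (e.1 + m.1) (e.2.1 + m.2) = "P" ∧ (e.1 + m.1, e.2.1 + m.2) ≠ (i, j)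

lemma pvBfs_main (p : List (List String)) (i j : Int) :
    ∀ (n : Nat) (q : List (Int × Int × Int)) (v : List (Int × Int)),
    5 * pvCnt v + q.length ≤ n →
    (∀ e ∈ q, 1 ≤ e.2.2 ∧ InRp e.1 e.2.1 ∧ pvCell p e.1 e.2.1 ≠ "P") →
    (∀ x ∈ v, pvCell p x.1 x.2 = "P" → x = (i, j)) →
    (i, j) ∈ v →
    (pvBfs p q v = true ↔ ∃ e ∈ q, pvTrigE p i j e) := by
  intro n
  induction n with
  | zero =>
    intro q v hn _ _ _
    have hq0 : q = [] := List.eq_nil_of_length_eq_zero (by omega)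
    subst hq0
    simp [pvBfs]
  | succ n ih =>
    intro q v hn hq hv hs
    cases q with
    | nil => simp [pvBfs]
    | cons e q' =>
      obtain ⟨dr, dc, len⟩ := e
      have hhead := hq _ List.mem_cons_self
      have hlen : 1 ≤ len := hhead.1
      have hPhead : pvCell p dr dc ≠ "P" := hhead.2.2
      rw [pvBfs]
      have hv1 : ∀ x ∈ (if (dr, dc) ∈ v then v else (dr, dc) :: v),
          pvCell p x.1 x.2 = "P" → x = (i, j) := by
        split
        · exact hv
        · intro x hx hc
          rcases List.mem_cons.1 hx with rfl | hx'
          · exact absurd hc hPhead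
          · exact hv x hx' hc
      have hs1 : (i, j) ∈ (if (dr, dc) ∈ v then v else (dr, dc) :: v) := by
        split
        · exact hs
        · exact List.mem_cons_of_mem _ hs
      have hcnt : pvCnt (if (dr, dc) ∈ v then v else (dr, dc) :: v) ≤ pvCnt v := by
        split
        · exact le_refl _
        · exact pvCnt_cons_le _ _
      split
      · rename_i hstep
        rw [pvStep_none_iff] at hstep
        obtain ⟨hle, m, hm, hIn, hcell, hnv⟩ := hstep
        have hlen1 : len = 1 := by omega
        have hne : (dr + m.1, dc + m.2) ≠ (i, j) := by
          intro he
          exact hnv (by rw [he]; exact hs1)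
        constructor
        · intro _
          exact ⟨(dr, dc, len), List.mem_cons_self, hlen1, m, hm, hIn, hcell, hne⟩
        · intro _; rfl
      · rename_i q1 v1 hstep
        have hmem := pvStep_some_mem p dr dc len pvMoves q' _ q1 v1 (pvMoves_pairwise dr dc) hstep
        have hvis := pvStep_some_visited p dr dc len pvMoves q' _ q1 v1 hstep
        have hsub := pvStep_some_subset p dr dc len pvMoves q' _ q1 v1 hstep
        have hq1 : ∀ e ∈ q1, 1 ≤ e.2.2 ∧ InRp e.1 e.2.1 ∧ pvCell p e.1 e.2.1 ≠ "P" := by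
          intro e he
          rcases (hmem e).1 he with he' | ⟨m, _, ⟨hIn, _, hPc, _⟩, rfl⟩
          · exact hq e (List.mem_cons_of_mem _ he')
          · refine ⟨?_, hIn, hPc⟩
            show (1 : Int) ≤ len + 1
            omega
        have hv1inv : ∀ x ∈ v1, pvCell p x.1 x.2 = "P" → x = (i, j) := by
          intro x hx hc
          rcases hvis x hx with hxv | ⟨_, hnp⟩
          · exact hv1 x hxv hc
          · exact absurd hc hnp
        have hs2 : (i, j) ∈ v1 := hsub _ hs1
        have hmes := pvStep_measure p dr dc len pvMoves q' _ q1 v1 hstep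
        have hbound : 5 * pvCnt v1 + q1.length ≤ n := by
          simp only [List.length_cons] at hn
          omega
        rw [ih q1 v1 hbound hq1 hv1inv hs2]
        constructor
        · rintro ⟨e, he, ht⟩
          rcases (hmem e).1 he with he' | ⟨m, _, _, rfl⟩
          · exact ⟨e, List.mem_cons_of_mem _ he', ht⟩
          · exfalso
            have h1 : len + 1 = 1 := ht.1
            omega
        · rintro ⟨e, he, ht⟩
          rcases List.mem_cons.1 he with rfl | he'
          · exfalso
            have hE1 : len = 1 := ht.1
            obtain ⟨_, m, hm, hIn, hcell, hne⟩ := ht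
            have hnv : (dr + m.1, dc + m.2) ∉ (if (dr, dc) ∈ v then v else (dr, dc) :: v) := by
              intro hin
              exact hne (hv1 _ hin hcell)
            have hnone := (pvStep_none_iff p dr dc len pvMoves q' _).2
              ⟨by omega, m, hm, hIn, hcell, hnv⟩
            rw [hnone] at hstep
            simp at hstep
          · exact ⟨e, (hmem e).2 (Or.inl he'), ht⟩

lemma pvBfs_start (p : List (List String)) (i j : Int) :
    pvBfs p [(i, j, 0)] [] = true ↔
      ((∃ m ∈ pvMoves, InRp (i + m.1) (j + m.2) ∧ pvCell p (i + m.1) (j + m.2) = "P") ∨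
       (∃ m ∈ pvMoves, (InRp (i + m.1) (j + m.2) ∧ pvCell p (i + m.1) (j + m.2) ≠ "X" ∧
          pvCell p (i + m.1) (j + m.2) ≠ "P") ∧
        ∃ m' ∈ pvMoves, InRp (i + m.1 + m'.1) (j + m.2 + m'.2) ∧
          pvCell p (i + m.1 + m'.1) (j + m.2 + m'.2) = "P" ∧
          (i + m.1 + m'.1, j + m.2 + m'.2) ≠ (i, j))) := by
  have hvv : (if ((i : Int), (j : Int)) ∈ ([] : List (Int × Int)) then ([] : List (Int × Int))
      else [(i, j)]) = [(i, j)] := by simp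
  rw [pvBfs, hvv]
  split
  · rename_i hstep
    rw [pvStep_none_iff] at hstep
    obtain ⟨_, m, hm, hIn, hcell, _⟩ := hstep
    constructor
    · intro _
      exact Or.inl ⟨m, hm, hIn, hcell⟩
    · intro _; rfl
  · rename_i q1 v1 hstep
    have hmem := pvStep_some_mem p i j 0 pvMoves [] [(i, j)] q1 v1 (pvMoves_pairwise i j) hstep
    have hvis := pvStep_some_visited p i j 0 pvMoves [] [(i, j)] q1 v1 hstep
    have hsub := pvStep_some_subset p i j 0 pvMoves [] [(i, j)] q1 v1 hstep
    have hnd1 : ¬∃ m ∈ pvMoves, InRp (i + m.1) (j + m.2) ∧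
        pvCell p (i + m.1) (j + m.2) = "P" ∧ (i + m.1, j + m.2) ∉ ([(i, j)] : List (Int × Int)) := by
      intro hE
      have hnone := (pvStep_none_iff p i j 0 pvMoves [] [(i, j)]).2 ⟨by omega, hE⟩
      rw [hnone] at hstep
      simp at hstep
    have hq1 : ∀ e ∈ q1, 1 ≤ e.2.2 ∧ InRp e.1 e.2.1 ∧ pvCell p e.1 e.2.1 ≠ "P" := by
      intro e he
      rcases (hmem e).1 he with he' | ⟨m, _, ⟨hIn, _, hPc, _⟩, rfl⟩
      · exact absurd he' (List.not_mem_nil)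
      · refine ⟨?_, hIn, hPc⟩
        show (1 : Int) ≤ 0 + 1
        norm_num
    have hv1inv : ∀ x ∈ v1, pvCell p x.1 x.2 = "P" → x = (i, j) := by
      intro x hx _
      rcases hvis x hx with hxv | ⟨_, hnp⟩
      · exact List.mem_singleton.1 hxv
      · exact absurd (by assumption) hnp
    have hs1 : (i, j) ∈ v1 := hsub _ (List.mem_singleton.2 rfl)
    rw [pvBfs_main p i j (5 * pvCnt v1 + q1.length) q1 v1 (le_refl _) hq1 hv1inv hs1]
    constructor
    · rintro ⟨e, he, ht⟩
      rcases (hmem e).1 he with he' | ⟨m, hm, ⟨hIn, hX, hPc, _⟩, rfl⟩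
      · exact absurd he' (List.not_mem_nil)
      · obtain ⟨_, m', hm', hIn', hcell', hne'⟩ := ht
        exact Or.inr ⟨m, hm, ⟨hIn, hX, hPc⟩, m', hm', hIn', hcell', hne'⟩
    · rintro (⟨m, hm, hIn, hcell⟩ | ⟨m, hm, ⟨hIn, hX, hPc⟩, m', hm', hIn', hcell', hne'⟩)
      · exfalso
        exact hnd1 ⟨m, hm, hIn, hcell, by simp [pv_move_ne i j m hm]⟩
      · refine ⟨(i + m.1, j + m.2, 0 + 1), (hmem _).2 (Or.inr ⟨m, hm,
          ⟨hIn, hX, hPc, by simp [pv_move_ne i j m hm]⟩, rfl⟩), ?_⟩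
        refine ⟨?_, m', hm', hIn', hcell', hne'⟩
        show (0 : Int) + 1 = 1
        norm_num

lemma pvMemA : ((1 : Int), (0 : Int)) ∈ pvMoves := by simp [pvMoves]
lemma pvMemB : ((-1 : Int), (0 : Int)) ∈ pvMoves := by simp [pvMoves]
lemma pvMemC : ((0 : Int), (1 : Int)) ∈ pvMoves := by simp [pvMoves]
lemma pvMemD : ((0 : Int), (-1 : Int)) ∈ pvMoves := by simp [pvMoves]

lemma pattern_iff (p : List (List String)) (i j : Int) (hij : InRp i j) :
    ((∃ m ∈ pvMoves, InRp (i + m.1) (j + m.2) ∧ pvCell p (i + m.1) (j + m.2) = "P") ∨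
     (∃ m ∈ pvMoves, (InRp (i + m.1) (j + m.2) ∧ pvCell p (i + m.1) (j + m.2) ≠ "X" ∧
        pvCell p (i + m.1) (j + m.2) ≠ "P") ∧
      ∃ m' ∈ pvMoves, InRp (i + m.1 + m'.1) (j + m.2 + m'.2) ∧
        pvCell p (i + m.1 + m'.1) (j + m.2 + m'.2) = "P" ∧
        (i + m.1 + m'.1, j + m.2 + m'.2) ≠ (i, j))) ↔
    altIllegalAt p i j = true := by
  obtain ⟨hi0, hi5, hj0, hj5⟩ := hij
  simp only [altIllegalAt, List.any_cons, List.any_nil, Bool.or_eq_true, Bool.and_eq_true,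
    beq_iff_eq, bne_iff_ne, altCell_eq, altInR, decide_eq_true_eq, ne_eq]
  norm_num
  constructor
  · rintro (⟨a, b, hm, hIn, hcell⟩ | ⟨a, b, hm, ⟨hIn, hX, hPc⟩, a', b', hm', hIn', hcell', hne'⟩)
    · simp only [pvMoves, List.mem_cons, List.not_mem_nil, or_false, Prod.mk.injEq] at hm
      rcases hm with ⟨rfl, rfl⟩ | ⟨rfl, rfl⟩ | ⟨rfl, rfl⟩ | ⟨rfl, rfl⟩
      · have hr : 0 ≤ i + (1 : Int) ∧ i + (1 : Int) < 5 ∧ 0 ≤ j + (0 : Int) ∧ j + (0 : Int) < 5 := hIn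
        rw [add_zero] at hcell
        exact Or.inl (Or.inl (Or.inl (⟨⟨⟨⟨by omega, by omega⟩, by omega⟩, by omega⟩, hcell⟩)))
      · have hr : 0 ≤ i + (-1 : Int) ∧ i + (-1 : Int) < 5 ∧ 0 ≤ j + (0 : Int) ∧ j + (0 : Int) < 5 := hIn
        rw [add_zero] at hcell
        exact Or.inl (Or.inl (Or.inr (Or.inl (⟨⟨⟨⟨by omega, by omega⟩, by omega⟩, by omega⟩, hcell⟩))))
      · have hr : 0 ≤ i + (0 : Int) ∧ i + (0 : Int) < 5 ∧ 0 ≤ j + (1 : Int) ∧ j + (1 : Int) < 5 := hIn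
        rw [add_zero] at hcell
        exact Or.inl (Or.inl (Or.inr (Or.inr (Or.inl (⟨⟨⟨⟨by omega, by omega⟩, by omega⟩, by omega⟩, hcell⟩)))))
      · have hr : 0 ≤ i + (0 : Int) ∧ i + (0 : Int) < 5 ∧ 0 ≤ j + (-1 : Int) ∧ j + (-1 : Int) < 5 := hIn
        rw [add_zero] at hcell
        exact Or.inl (Or.inl (Or.inr (Or.inr (Or.inr (⟨⟨⟨⟨by omega, by omega⟩, by omega⟩, by omega⟩, hcell⟩)))))
    · simp only [pvMoves, List.mem_cons, List.not_mem_nil, or_false, Prod.mk.injEq] at hm hm'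
      rcases hm with ⟨rfl, rfl⟩ | ⟨rfl, rfl⟩ | ⟨rfl, rfl⟩ | ⟨rfl, rfl⟩ <;>
        rcases hm' with ⟨rfl, rfl⟩ | ⟨rfl, rfl⟩ | ⟨rfl, rfl⟩ | ⟨rfl, rfl⟩
      · have hr' : 0 ≤ i + (1 : Int) + 1 ∧ i + (1 : Int) + 1 < 5 ∧ 0 ≤ j + (0 : Int) + 0 ∧ j + (0 : Int) + 0 < 5 := hIn'
        rw [show i + (1 : Int) + 1 = i + 2 from by ring,
          show j + (0 : Int) + 0 = j from by ring] at hcell'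
        rw [add_zero] at hX
        exact Or.inl (Or.inr (Or.inl (⟨⟨⟨⟨⟨by omega, by omega⟩, by omega⟩, by omega⟩, hcell'⟩, hX⟩)))
      · exact absurd (by ring : j + (0 : Int) + 0 = j) (hne' (by ring))
      · have hr' : 0 ≤ i + (1 : Int) + 0 ∧ i + (1 : Int) + 0 < 5 ∧ 0 ≤ j + (0 : Int) + 1 ∧ j + (0 : Int) + 1 < 5 := hIn'
        rw [show i + (1 : Int) + 0 = i + 1 from by ring,
          show j + (0 : Int) + 1 = j + 1 from by ring] at hcell'
        rw [add_zero] at hX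
        exact Or.inr (Or.inl (⟨⟨⟨⟨⟨by omega, by omega⟩, by omega⟩, by omega⟩, hcell'⟩, Or.inr hX⟩))
      · have hr' : 0 ≤ i + (1 : Int) + 0 ∧ i + (1 : Int) + 0 < 5 ∧ 0 ≤ j + (0 : Int) + -1 ∧ j + (0 : Int) + -1 < 5 := hIn'
        rw [show i + (1 : Int) + 0 = i + 1 from by ring,
          show j + (0 : Int) + -1 = j + -1 from by ring] at hcell'
        rw [add_zero] at hX
        exact Or.inr (Or.inr (Or.inl (⟨⟨⟨⟨⟨by omega, by omega⟩, by omega⟩, by omega⟩, hcell'⟩, Or.inr hX⟩)))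
      · exact absurd (by ring : j + (0 : Int) + 0 = j) (hne' (by ring))
      · have hr' : 0 ≤ i + (-1 : Int) + -1 ∧ i + (-1 : Int) + -1 < 5 ∧ 0 ≤ j + (0 : Int) + 0 ∧ j + (0 : Int) + 0 < 5 := hIn'
        rw [show i + (-1 : Int) + -1 = i + -2 from by ring,
          show j + (0 : Int) + 0 = j from by ring] at hcell'
        rw [add_zero] at hX
        exact Or.inl (Or.inr (Or.inr (Or.inl (⟨⟨⟨⟨⟨by omega, by omega⟩, by omega⟩, by omega⟩, hcell'⟩, hX⟩))))
      · have hr' : 0 ≤ i + (-1 : Int) + 0 ∧ i + (-1 : Int) + 0 < 5 ∧ 0 ≤ j + (0 : Int) + 1 ∧ j + (0 : Int) + 1 < 5 := hIn'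
        rw [show i + (-1 : Int) + 0 = i + -1 from by ring,
          show j + (0 : Int) + 1 = j + 1 from by ring] at hcell'
        rw [add_zero] at hX
        exact Or.inr (Or.inr (Or.inr (Or.inl (⟨⟨⟨⟨⟨by omega, by omega⟩, by omega⟩, by omega⟩, hcell'⟩, Or.inr hX⟩))))
      · have hr' : 0 ≤ i + (-1 : Int) + 0 ∧ i + (-1 : Int) + 0 < 5 ∧ 0 ≤ j + (0 : Int) + -1 ∧ j + (0 : Int) + -1 < 5 := hIn'
        rw [show i + (-1 : Int) + 0 = i + -1 from by ring,
          show j + (0 : Int) + -1 = j + -1 from by ring] at hcell'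
        rw [add_zero] at hX
        exact Or.inr (Or.inr (Or.inr (Or.inr (⟨⟨⟨⟨⟨by omega, by omega⟩, by omega⟩, by omega⟩, hcell'⟩, Or.inr hX⟩))))
      · have hr' : 0 ≤ i + (0 : Int) + 1 ∧ i + (0 : Int) + 1 < 5 ∧ 0 ≤ j + (1 : Int) + 0 ∧ j + (1 : Int) + 0 < 5 := hIn'
        rw [show i + (0 : Int) + 1 = i + 1 from by ring,
          show j + (1 : Int) + 0 = j + 1 from by ring] at hcell'
        rw [add_zero] at hX
        exact Or.inr (Or.inl (⟨⟨⟨⟨⟨by omega, by omega⟩, by omega⟩, by omega⟩, hcell'⟩, Or.inl hX⟩))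
      · have hr' : 0 ≤ i + (0 : Int) + -1 ∧ i + (0 : Int) + -1 < 5 ∧ 0 ≤ j + (1 : Int) + 0 ∧ j + (1 : Int) + 0 < 5 := hIn'
        rw [show i + (0 : Int) + -1 = i + -1 from by ring,
          show j + (1 : Int) + 0 = j + 1 from by ring] at hcell'
        rw [add_zero] at hX
        exact Or.inr (Or.inr (Or.inr (Or.inl (⟨⟨⟨⟨⟨by omega, by omega⟩, by omega⟩, by omega⟩, hcell'⟩, Or.inl hX⟩))))
      · have hr' : 0 ≤ i + (0 : Int) + 0 ∧ i + (0 : Int) + 0 < 5 ∧ 0 ≤ j + (1 : Int) + 1 ∧ j + (1 : Int) + 1 < 5 := hIn'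
        rw [show i + (0 : Int) + 0 = i from by ring,
          show j + (1 : Int) + 1 = j + 2 from by ring] at hcell'
        rw [add_zero] at hX
        exact Or.inl (Or.inr (Or.inr (Or.inr (Or.inl (⟨⟨⟨⟨⟨by omega, by omega⟩, by omega⟩, by omega⟩, hcell'⟩, hX⟩)))))
      · exact absurd (by ring : j + (1 : Int) + -1 = j) (hne' (by ring))
      · have hr' : 0 ≤ i + (0 : Int) + 1 ∧ i + (0 : Int) + 1 < 5 ∧ 0 ≤ j + (-1 : Int) + 0 ∧ j + (-1 : Int) + 0 < 5 := hIn'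
        rw [show i + (0 : Int) + 1 = i + 1 from by ring,
          show j + (-1 : Int) + 0 = j + -1 from by ring] at hcell'
        rw [add_zero] at hX
        exact Or.inr (Or.inr (Or.inl (⟨⟨⟨⟨⟨by omega, by omega⟩, by omega⟩, by omega⟩, hcell'⟩, Or.inl hX⟩)))
      · have hr' : 0 ≤ i + (0 : Int) + -1 ∧ i + (0 : Int) + -1 < 5 ∧ 0 ≤ j + (-1 : Int) + 0 ∧ j + (-1 : Int) + 0 < 5 := hIn'
        rw [show i + (0 : Int) + -1 = i + -1 from by ring,
          show j + (-1 : Int) + 0 = j + -1 from by ring] at hcell'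
        rw [add_zero] at hX
        exact Or.inr (Or.inr (Or.inr (Or.inr (⟨⟨⟨⟨⟨by omega, by omega⟩, by omega⟩, by omega⟩, hcell'⟩, Or.inl hX⟩))))
      · exact absurd (by ring : j + (-1 : Int) + 1 = j) (hne' (by ring))
      · have hr' : 0 ≤ i + (0 : Int) + 0 ∧ i + (0 : Int) + 0 < 5 ∧ 0 ≤ j + (-1 : Int) + -1 ∧ j + (-1 : Int) + -1 < 5 := hIn'
        rw [show i + (0 : Int) + 0 = i from by ring,
          show j + (-1 : Int) + -1 = j + -2 from by ring] at hcell'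
        rw [add_zero] at hX
        exact Or.inl (Or.inr (Or.inr (Or.inr (Or.inr (⟨⟨⟨⟨⟨by omega, by omega⟩, by omega⟩, by omega⟩, hcell'⟩, hX⟩)))))
  · rintro (((hA | hA | hA | hA) | (hB | hB | hB | hB)) | (hC | hC | hC | hC))
    · obtain ⟨hr, hcell⟩ := hA
      refine Or.inl ⟨1, 0, pvMemA, ⟨by omega, by omega, by omega, by omega⟩, ?_⟩
      rw [add_zero]
      exact hcell
    · obtain ⟨hr, hcell⟩ := hA
      refine Or.inl ⟨-1, 0, pvMemB, ⟨by omega, by omega, by omega, by omega⟩, ?_⟩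
      rw [add_zero]
      exact hcell
    · obtain ⟨hr, hcell⟩ := hA
      refine Or.inl ⟨0, 1, pvMemC, ⟨by omega, by omega, by omega, by omega⟩, ?_⟩
      rw [add_zero]
      exact hcell
    · obtain ⟨hr, hcell⟩ := hA
      refine Or.inl ⟨0, -1, pvMemD, ⟨by omega, by omega, by omega, by omega⟩, ?_⟩
      rw [add_zero]
      exact hcell
    · obtain ⟨⟨hr, hP2⟩, hX2⟩ := hB
      by_cases hmid : pvCell p (i + 1) (j) = "P"
      ·
        refine Or.inl ⟨1, 0, pvMemA, ⟨by omega, by omega, by omega, by omega⟩, ?_⟩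
        rw [add_zero]
        exact hmid
      ·
        refine Or.inr ⟨1, 0, pvMemA, ⟨⟨by omega, by omega, by omega, by omega⟩, ?_, ?_⟩, 1, 0, pvMemA, ⟨by omega, by omega, by omega, by omega⟩, ?_, by omega⟩
        · rw [add_zero]
          exact hX2
        · rw [add_zero]
          exact hmid
        · rw [show i + (1 : Int) + 1 = i + 2 from by ring,
            show j + (0 : Int) + 0 = j from by ring]
          exact hP2
    · obtain ⟨⟨hr, hP2⟩, hX2⟩ := hB
      by_cases hmid : pvCell p (i + -1) (j) = "P"
      ·
        refine Or.inl ⟨-1, 0, pvMemB, ⟨by omega, by omega, by omega, by omega⟩, ?_⟩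
        rw [add_zero]
        exact hmid
      ·
        refine Or.inr ⟨-1, 0, pvMemB, ⟨⟨by omega, by omega, by omega, by omega⟩, ?_, ?_⟩, -1, 0, pvMemB, ⟨by omega, by omega, by omega, by omega⟩, ?_, by omega⟩
        · rw [add_zero]
          exact hX2
        · rw [add_zero]
          exact hmid
        · rw [show i + (-1 : Int) + -1 = i + -2 from by ring,
            show j + (0 : Int) + 0 = j from by ring]
          exact hP2
    · obtain ⟨⟨hr, hP2⟩, hX2⟩ := hB
      by_cases hmid : pvCell p (i) (j + 1) = "P"
      ·
        refine Or.inl ⟨0, 1, pvMemC, ⟨by omega, by omega, by omega, by omega⟩, ?_⟩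
        rw [add_zero]
        exact hmid
      ·
        refine Or.inr ⟨0, 1, pvMemC, ⟨⟨by omega, by omega, by omega, by omega⟩, ?_, ?_⟩, 0, 1, pvMemC, ⟨by omega, by omega, by omega, by omega⟩, ?_, by omega⟩
        · rw [add_zero]
          exact hX2
        · rw [add_zero]
          exact hmid
        · rw [show i + (0 : Int) + 0 = i from by ring,
            show j + (1 : Int) + 1 = j + 2 from by ring]
          exact hP2
    · obtain ⟨⟨hr, hP2⟩, hX2⟩ := hB
      by_cases hmid : pvCell p (i) (j + -1) = "P"
      ·
        refine Or.inl ⟨0, -1, pvMemD, ⟨by omega, by omega, by omega, by omega⟩, ?_⟩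
        rw [add_zero]
        exact hmid
      ·
        refine Or.inr ⟨0, -1, pvMemD, ⟨⟨by omega, by omega, by omega, by omega⟩, ?_, ?_⟩, 0, -1, pvMemD, ⟨by omega, by omega, by omega, by omega⟩, ?_, by omega⟩
        · rw [add_zero]
          exact hX2
        · rw [add_zero]
          exact hmid
        · rw [show i + (0 : Int) + 0 = i from by ring,
            show j + (-1 : Int) + -1 = j + -2 from by ring]
          exact hP2
    · obtain ⟨⟨hr, hP2⟩, hcor⟩ := hC
      rcases hcor with hc | hc
      · by_cases hcp : pvCell p i (j + 1) = "P"
        ·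
          refine Or.inl ⟨0, 1, pvMemC, ⟨by omega, by omega, by omega, by omega⟩, ?_⟩
          rw [add_zero]
          exact hcp
        ·
          refine Or.inr ⟨0, 1, pvMemC, ⟨⟨by omega, by omega, by omega, by omega⟩, ?_, ?_⟩, 1, 0, pvMemA, ⟨by omega, by omega, by omega, by omega⟩, ?_, by omega⟩
          · rw [add_zero]
            exact hc
          · rw [add_zero]
            exact hcp
          · rw [show i + (0 : Int) + 1 = i + 1 from by ring,
              show j + (1 : Int) + 0 = j + 1 from by ring]
            exact hP2
      · by_cases hcp : pvCell p (i + 1) j = "P"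
        ·
          refine Or.inl ⟨1, 0, pvMemA, ⟨by omega, by omega, by omega, by omega⟩, ?_⟩
          rw [add_zero]
          exact hcp
        ·
          refine Or.inr ⟨1, 0, pvMemA, ⟨⟨by omega, by omega, by omega, by omega⟩, ?_, ?_⟩, 0, 1, pvMemC, ⟨by omega, by omega, by omega, by omega⟩, ?_, by omega⟩
          · rw [add_zero]
            exact hc
          · rw [add_zero]
            exact hcp
          · rw [show i + (1 : Int) + 0 = i + 1 from by ring,
              show j + (0 : Int) + 1 = j + 1 from by ring]
            exact hP2
    · obtain ⟨⟨hr, hP2⟩, hcor⟩ := hC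
      rcases hcor with hc | hc
      · by_cases hcp : pvCell p i (j + -1) = "P"
        ·
          refine Or.inl ⟨0, -1, pvMemD, ⟨by omega, by omega, by omega, by omega⟩, ?_⟩
          rw [add_zero]
          exact hcp
        ·
          refine Or.inr ⟨0, -1, pvMemD, ⟨⟨by omega, by omega, by omega, by omega⟩, ?_, ?_⟩, 1, 0, pvMemA, ⟨by omega, by omega, by omega, by omega⟩, ?_, by omega⟩
          · rw [add_zero]
            exact hc
          · rw [add_zero]
            exact hcp
          · rw [show i + (0 : Int) + 1 = i + 1 from by ring,
              show j + (-1 : Int) + 0 = j + -1 from by ring]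
            exact hP2
      · by_cases hcp : pvCell p (i + 1) j = "P"
        ·
          refine Or.inl ⟨1, 0, pvMemA, ⟨by omega, by omega, by omega, by omega⟩, ?_⟩
          rw [add_zero]
          exact hcp
        ·
          refine Or.inr ⟨1, 0, pvMemA, ⟨⟨by omega, by omega, by omega, by omega⟩, ?_, ?_⟩, 0, -1, pvMemD, ⟨by omega, by omega, by omega, by omega⟩, ?_, by omega⟩
          · rw [add_zero]
            exact hc
          · rw [add_zero]
            exact hcp
          · rw [show i + (1 : Int) + 0 = i + 1 from by ring,
              show j + (0 : Int) + -1 = j + -1 from by ring]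
            exact hP2
    · obtain ⟨⟨hr, hP2⟩, hcor⟩ := hC
      rcases hcor with hc | hc
      · by_cases hcp : pvCell p i (j + 1) = "P"
        ·
          refine Or.inl ⟨0, 1, pvMemC, ⟨by omega, by omega, by omega, by omega⟩, ?_⟩
          rw [add_zero]
          exact hcp
        ·
          refine Or.inr ⟨0, 1, pvMemC, ⟨⟨by omega, by omega, by omega, by omega⟩, ?_, ?_⟩, -1, 0, pvMemB, ⟨by omega, by omega, by omega, by omega⟩, ?_, by omega⟩
          · rw [add_zero]
            exact hc
          · rw [add_zero]
            exact hcp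
          · rw [show i + (0 : Int) + -1 = i + -1 from by ring,
              show j + (1 : Int) + 0 = j + 1 from by ring]
            exact hP2
      · by_cases hcp : pvCell p (i + -1) j = "P"
        ·
          refine Or.inl ⟨-1, 0, pvMemB, ⟨by omega, by omega, by omega, by omega⟩, ?_⟩
          rw [add_zero]
          exact hcp
        ·
          refine Or.inr ⟨-1, 0, pvMemB, ⟨⟨by omega, by omega, by omega, by omega⟩, ?_, ?_⟩, 0, 1, pvMemC, ⟨by omega, by omega, by omega, by omega⟩, ?_, by omega⟩
          · rw [add_zero]
            exact hc
          · rw [add_zero]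
            exact hcp
          · rw [show i + (-1 : Int) + 0 = i + -1 from by ring,
              show j + (0 : Int) + 1 = j + 1 from by ring]
            exact hP2
    · obtain ⟨⟨hr, hP2⟩, hcor⟩ := hC
      rcases hcor with hc | hc
      · by_cases hcp : pvCell p i (j + -1) = "P"
        ·
          refine Or.inl ⟨0, -1, pvMemD, ⟨by omega, by omega, by omega, by omega⟩, ?_⟩
          rw [add_zero]
          exact hcp
        ·
          refine Or.inr ⟨0, -1, pvMemD, ⟨⟨by omega, by omega, by omega, by omega⟩, ?_, ?_⟩, -1, 0, pvMemB, ⟨by omega, by omega, by omega, by omega⟩, ?_, by omega⟩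
          · rw [add_zero]
            exact hc
          · rw [add_zero]
            exact hcp
          · rw [show i + (0 : Int) + -1 = i + -1 from by ring,
              show j + (-1 : Int) + 0 = j + -1 from by ring]
            exact hP2
      · by_cases hcp : pvCell p (i + -1) j = "P"
        ·
          refine Or.inl ⟨-1, 0, pvMemB, ⟨by omega, by omega, by omega, by omega⟩, ?_⟩
          rw [add_zero]
          exact hcp
        ·
          refine Or.inr ⟨-1, 0, pvMemB, ⟨⟨by omega, by omega, by omega, by omega⟩, ?_, ?_⟩, 0, -1, pvMemD, ⟨by omega, by omega, by omega, by omega⟩, ?_, by omega⟩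
          · rw [add_zero]
            exact hc
          · rw [add_zero]
            exact hcp
          · rw [show i + (-1 : Int) + 0 = i + -1 from by ring,
              show j + (0 : Int) + -1 = j + -1 from by ring]
            exact hP2

lemma per_cell (p : List (List String)) (i j : Int) (hij : InRp i j) :
    (pvBfs p [(i, j, 0)] [] = true) ↔ (altIllegalAt p i j = true) :=
  (pvBfs_start p i j).trans (pattern_iff p i j hij)

lemma mem_foldl_gen {α β : Type} (Q : α → β → Prop) (F : List β → α → List β)
    (H : ∀ acc a x, x ∈ F acc a ↔ x ∈ acc ∨ Q a x) :
    ∀ (L : List α) (acc : List β) (x : β), x ∈ L.foldl F acc ↔ x ∈ acc ∨ ∃ a ∈ L, Q a x := by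
  intro L
  induction L with
  | nil => simp
  | cons a t ih =>
    intro acc x
    simp only [List.foldl_cons]
    rw [ih, H]
    constructor
    · rintro ((hx | hq) | ⟨b, hb, hQ⟩)
      · exact Or.inl hx
      · exact Or.inr ⟨a, List.mem_cons_self, hq⟩
      · exact Or.inr ⟨b, List.mem_cons_of_mem _ hb, hQ⟩
    · rintro (hx | ⟨b, hb, hQ⟩)
      · exact Or.inl (Or.inl hx)
      · rcases List.mem_cons.1 hb with rfl | hb'
        · exact Or.inl (Or.inr hQ)
        · exact Or.inr ⟨b, hb', hQ⟩

lemma mem_pvPeople (p : List (List String)) (s : Int × Int) :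
    s ∈ pvPeople p ↔ ∃ a ∈ PySem.List.pyRange 0 5 1, ∃ b ∈ PySem.List.pyRange 0 5 1,
      pvCell p a b = "P" ∧ s = (a, b) := by
  have inner : ∀ (a : Int) (acc : List (Int × Int)) (x : Int × Int),
      x ∈ (PySem.List.pyRange 0 5 1).foldl
        (fun acc2 j => if pvCell p a j = "P" then acc2 ++ [(a, j)] else acc2) acc ↔
      x ∈ acc ∨ ∃ b ∈ PySem.List.pyRange 0 5 1, pvCell p a b = "P" ∧ x = (a, b) := by
    intro a acc x
    refine mem_foldl_gen (fun b x => pvCell p a b = "P" ∧ x = (a, b)) _ ?_ _ acc x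
    intro acc2 b y
    split
    · rename_i hc
      simp [hc]
    · rename_i hc
      simp [hc]
  have outer := mem_foldl_gen
    (fun a (x : Int × Int) => ∃ b ∈ PySem.List.pyRange 0 5 1, pvCell p a b = "P" ∧ x = (a, b))
    (fun acc a => (PySem.List.pyRange 0 5 1).foldl
        (fun acc2 j => if pvCell p a j = "P" then acc2 ++ [(a, j)] else acc2) acc)
    (fun acc a x => inner a acc x) (PySem.List.pyRange 0 5 1) [] s
  rw [pvPeople, outer]
  simp

lemma findIllegal_eq (p : List (List String)) : findIllegal p = findIllegal_alt p := by
  show (if (pvPeople p).length = 0 then (1 : Int)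
      else if (pvPeople p).any (fun s => pvBfs p [(s.1, s.2, 0)] []) then 0 else 1) =
    (if (PySem.List.pyRange 0 5 1).any (fun i => (PySem.List.pyRange 0 5 1).any (fun j =>
      (altCell p i j == "P") && altIllegalAt p i j)) then 0 else 1)
  have key : ((pvPeople p).any (fun s => pvBfs p [(s.1, s.2, 0)] []) = true) ↔
      ((PySem.List.pyRange 0 5 1).any (fun i => (PySem.List.pyRange 0 5 1).any (fun j =>
        (altCell p i j == "P") && altIllegalAt p i j)) = true) := by
    simp only [List.any_eq_true, Bool.and_eq_true, beq_iff_eq, altCell_eq]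
    constructor
    · rintro ⟨s, hs, hb⟩
      rw [mem_pvPeople] at hs
      obtain ⟨a, ha, b, hb2, hcell, rfl⟩ := hs
      have hIn : InRp a b := by
        rw [PySem.List.mem_pyRange_one] at ha hb2
        exact ⟨ha.1, ha.2, hb2.1, hb2.2⟩
      exact ⟨a, ha, b, hb2, hcell, (per_cell p a b hIn).1 hb⟩
    · rintro ⟨a, ha, b, hb2, hcell, hil⟩
      have hIn : InRp a b := by
        rw [PySem.List.mem_pyRange_one] at ha hb2
        exact ⟨ha.1, ha.2, hb2.1, hb2.2⟩
      exact ⟨(a, b), (mem_pvPeople p (a, b)).2 ⟨a, ha, b, hb2, hcell, rfl⟩,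
        (per_cell p a b hIn).2 hil⟩
  by_cases hz : (pvPeople p).length = 0
  · rw [if_pos hz]
    have hnil : pvPeople p = [] := List.eq_nil_of_length_eq_zero hz
    have hB : ¬((PySem.List.pyRange 0 5 1).any (fun i => (PySem.List.pyRange 0 5 1).any (fun j =>
        (altCell p i j == "P") && altIllegalAt p i j)) = true) := by
      intro hb
      have := key.2 hb
      rw [hnil] at this
      simp at this
    rw [if_neg hB]
  · rw [if_neg hz]
    by_cases hA : (pvPeople p).any (fun s => pvBfs p [(s.1, s.2, 0)] []) = true
    · rw [if_pos hA, if_pos (key.1 hA)]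
    · rw [if_neg hA, if_neg (fun hB => hA (key.2 hB))]

-- ===== VERDICT (by name: the statement is the Claim_ definition above) =====
theorem findIllegal_spec : Claim_equal_findIllegal := by
  intro p _ _
  unfold Spec_findIllegal
  exact findIllegal_eq p
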